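-- pv_equiv track=rewrite | github.com/KUkingClass/algorithm-class | Lee-Jiseung/programmers/Level 2/84512 모음사전/solution.py | solution
-- ===== SOURCE A (Python) =====
-- d = {0:'', 1:'A', 2:'E', 3:'I', 4:'O', 5:'U'}
--
-- def num2alpha(x):
--     return d[x]
--
-- def solution(word):
--     answer = 0
--     cur = [0] * 5
--
--     while word != ''.join(list(map(lambda x: num2alpha(x),cur))):
--         answer += 1
--         flag = False
--         for i in range(5):
--             if cur[i] == 0:
--                 cur[i] += 1
--                 flag = True
--                 break
--         if flag:
--             continue
--         cur[4] += 1
--         for i in range(4, -1, -1):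
--             if cur[i] > 5:
--                 cur[i] = 0
--                 cur[i-1] += 1
--
--     return answer
-- ===== SOURCE B (Python) =====
-- RANK = {'A': 0, 'E': 1, 'I': 2, 'O': 3, 'U': 4}
-- # WEIGHTS[i] = size of the subtree rooted at position i: 1+5+25+..., i.e. how many
-- # words start with a fixed prefix of length i+1 (including the prefix itself).
-- WEIGHTS = [781, 156, 31, 6, 1]
--
-- def solution(word):
--     return sum(RANK[c] * WEIGHTS[i] + 1 for i, c in enumerate(word))
-- ===== Notes on version B (the rewrite author's own statement) =====
-- stated objective: simpler
-- what changed: Replaces A's brute-force enumeration of every word preceding the target (incrementing a 5-slot counter with carries and re-joining it to a string each step) by the direct positional-value formula: one pass over the word summing rank(c)*weight(i)+1 with precomputed subtree sizes [781,156,31,6,1].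
import Mathlib
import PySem

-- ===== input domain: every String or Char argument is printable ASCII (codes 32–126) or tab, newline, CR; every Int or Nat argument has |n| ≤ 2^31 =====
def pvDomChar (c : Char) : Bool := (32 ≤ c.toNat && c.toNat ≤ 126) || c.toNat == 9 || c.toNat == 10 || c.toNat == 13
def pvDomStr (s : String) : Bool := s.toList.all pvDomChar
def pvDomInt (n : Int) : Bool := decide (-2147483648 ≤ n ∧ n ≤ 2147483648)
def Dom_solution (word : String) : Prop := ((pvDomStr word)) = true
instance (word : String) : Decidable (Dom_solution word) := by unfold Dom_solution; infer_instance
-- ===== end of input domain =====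

-- B computes the word's index directly with the positional formula sum(rank(c)*weight(i)+1)
-- over precomputed subtree sizes, instead of A's brute-force enumeration of every
-- preceding word (objective: simpler — a one-line closed form replaces the counter loop).


-- ===== PORT A =====
-- d = {0:'', 1:'A', 2:'E', 3:'I', 4:'O', 5:'U'}
def dMap : PySem.Dict Int String :=
  PySem.Dict.ofList [(0, ""), (1, "A"), (2, "E"), (3, "I"), (4, "O"), (5, "U")]

-- d[x]; every x this is applied to lies in 0..5 (entries of cur after the carry pass),
-- so the KeyError default is never reached
def num2alpha (x : Int) : String := (PySem.Dict.get? dMap x).getD ""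

-- ''.join(list(map(lambda x: num2alpha(x), cur)))
def joinCur (cur : List Int) : String := PySem.Str.join "" (cur.map num2alpha)

-- for i in range(5): if cur[i] == 0: cur[i] += 1; flag = True; break
-- (none ↔ no entry is 0, i.e. flag stays False)
def incFirstZero : List Int → Option (List Int)
  | [] => none
  | x :: xs => if x = 0 then some (1 :: xs) else (incFirstZero xs).map (x :: ·)

-- one iteration of: if cur[i] > 5: cur[i] = 0; cur[i-1] += 1
-- (Python's cur[-1] at i = 0 wraps around to index 4)
def carryStep (cur : List Int) (i : Nat) : List Int :=
  if cur.getD i 0 > 5 then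
    let cur := cur.set i 0
    let j := if i = 0 then 4 else i - 1
    cur.set j (cur.getD j 0 + 1)
  else cur

-- cur[4] += 1;  for i in range(4, -1, -1): …
def carry (cur : List Int) : List Int :=
  ([4, 3, 2, 1, 0] : List Nat).foldl carryStep (cur.set 4 (cur.getD 4 0 + 1))

-- the while loop; the fuel only makes the recursion total: inside Pre_solution the loop
-- exits after at most 3905 iterations (the index of the last valid word), proved below
def loopA (fuel : Nat) (word : String) (answer : Int) (cur : List Int) : Int :=
  match fuel with
  | 0 => answer
  | fuel + 1 =>
    if word = joinCur cur then answer
    else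
      match incFirstZero cur with
      | some cur' => loopA fuel word (answer + 1) cur'
      | none => loopA fuel word (answer + 1) (carry cur)

def solution (word : String) : Int := loopA 3906 word 0 [0, 0, 0, 0, 0]

-- ===== PORT B =====
-- RANK[c]; any other char is a KeyError in Python, excluded by Pre_solution
def rankOf (c : Char) : Int :=
  match c with
  | 'A' => 0 | 'E' => 1 | 'I' => 2 | 'O' => 3 | 'U' => 4 | _ => 0

def weightsB : List Int := [781, 156, 31, 6, 1]

-- sum(RANK[c] * WEIGHTS[i] + 1 for i, c in enumerate(word))
-- (WEIGHTS[i] with i > 4 is an IndexError in Python, excluded by Pre_solution)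
def solution_alt (word : String) : Int :=
  ((PySem.List.enumerate word.toList).map
    (fun p => rankOf p.2 * ((PySem.List.pyGet? weightsB p.1).getD 0) + 1)).sum

-- ===== PRECONDITION & SPEC =====
-- A terminates exactly on the vowel words of length ≤ 5 (the words its enumeration
-- produces); on every other string its while loop never finds the word and A diverges.
def Pre_solution (word : String) : Prop :=
  word.toList.length ≤ 5 ∧
  word.toList.all (fun c => decide (c ∈ (['A', 'E', 'I', 'O', 'U'] : List Char))) = true
instance (word : String) : Decidable (Pre_solution word) := by unfold Pre_solution; infer_instance

def pvWitness_solution : String := "AEU"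

def Spec_solution (word : String) (out : Int) : Prop := out = solution_alt word
instance (word : String) (out : Int) : Decidable (Spec_solution word out) := by unfold Spec_solution; infer_instance

-- ===== CLAIM (what is proved, stated in full; the proofs are below) =====
def Claim_equal_solution : Prop :=
  ∀ (word : String), Dom_solution word → Pre_solution word → Spec_solution word (solution word)

-- ===== LEMMAS AND PROOFS =====

-- digit lists: a valid word encoded as digits 1..5 (A=1 … U=5)
def digitOf (c : Char) : Int :=
  match c with
  | 'A' => 1 | 'E' => 2 | 'I' => 3 | 'O' => 4 | 'U' => 5 | _ => 0

def charOfD (d : Int) : Char :=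
  match d with
  | 1 => 'A' | 2 => 'E' | 3 => 'I' | 4 => 'O' | 5 => 'U' | _ => '?'

def wordOf (ds : List Int) : String := String.ofList (ds.map charOfD)

-- the machine state corresponding to a digit list: digits then zero padding to length 5
def stateOf (ds : List Int) : List Int := ds ++ List.replicate (5 - ds.length) 0

-- all digit lists of length exactly k over 1..5
def tuples : Nat → List (List Int)
  | 0 => [[]]
  | n + 1 => ([1, 2, 3, 4, 5] : List Int).flatMap (fun d => (tuples n).map (d :: ·))

-- all 3906 digit lists of length ≤ 5
def allDs : List (List Int) := (List.range 6).flatMap tuples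

-- the loop body's state update
def stepA (cur : List Int) : List Int :=
  match incFirstZero cur with
  | some cur' => cur'
  | none => carry cur

-- the successor digit list in A's enumeration order
def bumpRev : List Int → List Int
  | [] => []
  | d :: rest => if d = 5 then bumpRev rest else (d + 1) :: rest

def nextDs (ds : List Int) : List Int :=
  if ds.length < 5 then ds ++ [1] else (bumpRev ds.reverse).reverse

-- B's value computed directly on the digit list (cheap for the kernel)
def Bd : List Int → List Int → Int
  | _, [] => 0
  | [], _ :: _ => 0
  | w :: ws, d :: ds => (d - 1) * w + 1 + Bd ws ds

-- index decoder (used only to witness injectivity of Bd on valid digit lists)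
def decodeGo : List Int → Int → List Int
  | [], _ => []
  | w :: ws, n =>
    if n ≤ 0 then []
    else ((n - 1) / w + 1) :: decodeGo ws ((n - 1) % w)

-- everything needed per digit list, checked by the kernel in chunks (a Bool,
-- so no extra Decidable instance is needed)
def Pb (ds : List Int) : Bool :=
  decide (joinCur (stateOf ds) = wordOf ds ∧
    solution_alt (wordOf ds) = Bd weightsB ds ∧
    decodeGo weightsB (Bd weightsB ds) = ds ∧
    0 ≤ Bd weightsB ds ∧ Bd weightsB ds ≤ 3905 ∧
    (Bd weightsB ds < 3905 →
      stepA (stateOf ds) = stateOf (nextDs ds) ∧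
      Bd weightsB (nextDs ds) = Bd weightsB ds + 1))

set_option maxRecDepth 10000 in
theorem P_len0 : ∀ ds ∈ tuples 0, Pb ds = true := by decide
set_option maxRecDepth 10000 in
theorem P_len1 : ∀ ds ∈ tuples 1, Pb ds = true := by decide
set_option maxRecDepth 10000 in
theorem P_len2 : ∀ ds ∈ tuples 2, Pb ds = true := by decide
set_option maxRecDepth 10000 in
set_option maxHeartbeats 1000000 in
theorem P_len3 : ∀ ds ∈ tuples 3, Pb ds = true := by decide
set_option maxRecDepth 10000 in
set_option maxHeartbeats 4000000 in
theorem P_len4 : ∀ ds ∈ tuples 4, Pb ds = true := by decide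
set_option maxRecDepth 10000 in
set_option maxHeartbeats 4000000 in
theorem P_len5_1 : ∀ ds ∈ tuples 4, Pb (1 :: ds) = true := by decide
set_option maxRecDepth 10000 in
set_option maxHeartbeats 4000000 in
theorem P_len5_2 : ∀ ds ∈ tuples 4, Pb (2 :: ds) = true := by decide
set_option maxRecDepth 10000 in
set_option maxHeartbeats 4000000 in
theorem P_len5_3 : ∀ ds ∈ tuples 4, Pb (3 :: ds) = true := by decide
set_option maxRecDepth 10000 in
set_option maxHeartbeats 4000000 in
theorem P_len5_4 : ∀ ds ∈ tuples 4, Pb (4 :: ds) = true := by decide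
set_option maxRecDepth 10000 in
set_option maxHeartbeats 4000000 in
theorem P_len5_5 : ∀ ds ∈ tuples 4, Pb (5 :: ds) = true := by decide

theorem P_all : ∀ ds ∈ allDs,
    joinCur (stateOf ds) = wordOf ds ∧
    solution_alt (wordOf ds) = Bd weightsB ds ∧
    decodeGo weightsB (Bd weightsB ds) = ds ∧
    0 ≤ Bd weightsB ds ∧ Bd weightsB ds ≤ 3905 ∧
    (Bd weightsB ds < 3905 →
      stepA (stateOf ds) = stateOf (nextDs ds) ∧
      Bd weightsB (nextDs ds) = Bd weightsB ds + 1) := by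
  intro ds hds
  suffices h : Pb ds = true by exact of_decide_eq_true h
  obtain ⟨k, hk, hds⟩ := List.mem_flatMap.1 hds
  have hk6 : k < 6 := List.mem_range.1 hk
  interval_cases k
  · exact P_len0 ds hds
  · exact P_len1 ds hds
  · exact P_len2 ds hds
  · exact P_len3 ds hds
  · exact P_len4 ds hds
  · rw [show tuples 5 = ([1, 2, 3, 4, 5] : List Int).flatMap
        (fun d => (tuples 4).map (d :: ·)) from rfl] at hds
    obtain ⟨d, hd, rest, hrest, rfl⟩ := by
      simpa only [List.mem_flatMap, List.mem_map] using hds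
    fin_cases hd
    · exact P_len5_1 rest hrest
    · exact P_len5_2 rest hrest
    · exact P_len5_3 rest hrest
    · exact P_len5_4 rest hrest
    · exact P_len5_5 rest hrest

-- membership machinery ------------------------------------------------------

theorem tuples_bounds (k : Nat) : ∀ ds ∈ tuples k,
    ds.length = k ∧ ∀ d ∈ ds, d ∈ ([1, 2, 3, 4, 5] : List Int) := by
  induction k with
  | zero => intro ds hds; simp only [tuples, List.mem_singleton] at hds; subst hds; simp
  | succ n ih =>
    intro ds hds
    obtain ⟨d, hd, rest, hrest, rfl⟩ := by
      simpa only [tuples, List.mem_flatMap, List.mem_map] using hds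
    obtain ⟨hlen, hmem⟩ := ih rest hrest
    refine ⟨by simp [hlen], ?_⟩
    intro x hx
    rcases List.mem_cons.1 hx with rfl | hx
    · exact hd
    · exact hmem x hx

theorem allDs_bounds (ds : List Int) (h : ds ∈ allDs) :
    ds.length ≤ 5 ∧ ∀ d ∈ ds, d ∈ ([1, 2, 3, 4, 5] : List Int) := by
  obtain ⟨k, hk, hds⟩ := List.mem_flatMap.1 h
  obtain ⟨hlen, hmem⟩ := tuples_bounds k ds hds
  exact ⟨by have := List.mem_range.1 hk; omega, hmem⟩

theorem mem_tuples (ds : List Int) (h : ∀ d ∈ ds, d ∈ ([1, 2, 3, 4, 5] : List Int)) :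
    ds ∈ tuples ds.length := by
  induction ds with
  | nil => decide
  | cons d rest ih =>
    simp only [List.length_cons, tuples, List.mem_flatMap, List.mem_map]
    exact ⟨d, h d (by simp), rest, ih (fun x hx => h x (by simp [hx])), rfl⟩

theorem mem_allDs (ds : List Int) (hlen : ds.length ≤ 5)
    (h : ∀ d ∈ ds, d ∈ ([1, 2, 3, 4, 5] : List Int)) : ds ∈ allDs := by
  refine List.mem_flatMap.2 ⟨ds.length, List.mem_range.2 (by omega), mem_tuples ds h⟩

theorem bumpRev_bounds (l : List Int) (h : ∀ d ∈ l, d ∈ ([1, 2, 3, 4, 5] : List Int)) :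
    (bumpRev l).length ≤ l.length ∧
    ∀ d ∈ bumpRev l, d ∈ ([1, 2, 3, 4, 5] : List Int) := by
  induction l with
  | nil => exact ⟨le_refl _, by intro d hd; cases hd⟩
  | cons d rest ih =>
    obtain ⟨ihl, ihm⟩ := ih (fun x hx => h x (by simp [hx]))
    by_cases hd5 : d = 5
    · refine ⟨?_, ?_⟩ <;> simp only [bumpRev, if_pos hd5]
      · exact le_trans ihl (by simp)
      · exact ihm
    · refine ⟨?_, ?_⟩ <;> simp only [bumpRev, if_neg hd5]
      · simp
      · intro x hx
        rcases List.mem_cons.1 hx with rfl | hx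
        · have hd : d ∈ ([1, 2, 3, 4, 5] : List Int) := h d (by simp)
          fin_cases hd <;> simp_all
        · exact h x (by simp [hx])

theorem nextDs_mem (ds : List Int) (h : ds ∈ allDs) : nextDs ds ∈ allDs := by
  obtain ⟨hlen, hmem⟩ := allDs_bounds ds h
  unfold nextDs
  by_cases hl : ds.length < 5
  · rw [if_pos hl]
    refine mem_allDs _ (by simp; omega) ?_
    intro d hd
    rcases List.mem_append.1 hd with hd | hd
    · exact hmem d hd
    · simp only [List.mem_singleton] at hd; subst hd; decide
  · rw [if_neg hl]
    have hrev : ∀ d ∈ ds.reverse, d ∈ ([1, 2, 3, 4, 5] : List Int) := by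
      intro d hd; exact hmem d (List.mem_reverse.1 hd)
    obtain ⟨hbl, hbm⟩ := bumpRev_bounds ds.reverse hrev
    refine mem_allDs _ ?_ ?_
    · simp only [List.length_reverse] at hbl ⊢; omega
    · intro d hd; exact hbm d (List.mem_reverse.1 hd)

-- injectivity of the encoding ------------------------------------------------

theorem digit_char_roundtrip (d : Int) (h : d ∈ ([1, 2, 3, 4, 5] : List Int)) :
    digitOf (charOfD d) = d := by
  fin_cases h <;> rfl

theorem wordOf_inj (ds1 ds2 : List Int)
    (h1 : ∀ d ∈ ds1, d ∈ ([1, 2, 3, 4, 5] : List Int))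
    (h2 : ∀ d ∈ ds2, d ∈ ([1, 2, 3, 4, 5] : List Int))
    (h : wordOf ds1 = wordOf ds2) : ds1 = ds2 := by
  have hchars : ds1.map charOfD = ds2.map charOfD := by
    have := congrArg String.toList h
    simpa [wordOf] using this
  have hmap : (ds1.map charOfD).map digitOf = (ds2.map charOfD).map digitOf :=
    congrArg (List.map digitOf) hchars
  have e1 : (ds1.map charOfD).map digitOf = ds1 := by
    rw [List.map_map]
    exact (List.map_congr_left (fun d hd => digit_char_roundtrip d (h1 d hd))).trans
      (List.map_id ds1)
  have e2 : (ds2.map charOfD).map digitOf = ds2 := by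
    rw [List.map_map]
    exact (List.map_congr_left (fun d hd => digit_char_roundtrip d (h2 d hd))).trans
      (List.map_id ds2)
  rw [e1, e2] at hmap
  exact hmap

theorem char_digit_roundtrip (c : Char) (h : c ∈ (['A', 'E', 'I', 'O', 'U'] : List Char)) :
    charOfD (digitOf c) = c := by
  fin_cases h <;> rfl

theorem digitOf_mem (c : Char) (h : c ∈ (['A', 'E', 'I', 'O', 'U'] : List Char)) :
    digitOf c ∈ ([1, 2, 3, 4, 5] : List Int) := by
  fin_cases h <;> decide

-- main loop invariant: starting at the state of ds, looking for a valid word n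
-- positions further on in the enumeration, the loop adds exactly n to answer
theorem loopA_run (n : Nat) : ∀ ds ∈ allDs, ∀ dsw ∈ allDs,
    ∀ (answer : Int) (fuel : Nat),
    Bd weightsB dsw = Bd weightsB ds + n → n < fuel →
    loopA fuel (wordOf dsw) answer (stateOf ds) = answer + n := by
  induction n with
  | zero =>
    intro ds hds dsw hdsw answer fuel heq hfuel
    obtain ⟨hjoin, _, hdec, _, _, _⟩ := P_all ds hds
    obtain ⟨_, _, hdecw, _, _, _⟩ := P_all dsw hdsw
    have hdseq : dsw = ds := by rw [← hdecw, ← hdec, heq]; norm_num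
    subst hdseq
    cases fuel with
    | zero => omega
    | succ f => simp [loopA, hjoin]
  | succ n ih =>
    intro ds hds dsw hdsw answer fuel heq hfuel
    obtain ⟨hjoin, _, _, hnn, hub, hstep⟩ := P_all ds hds
    obtain ⟨_, _, _, hnnw, hubw, _⟩ := P_all dsw hdsw
    have hlt : Bd weightsB ds < 3905 := by omega
    obtain ⟨hstepeq, hsucc⟩ := hstep hlt
    have hne : wordOf dsw ≠ joinCur (stateOf ds) := by
      rw [hjoin]
      intro hc
      have := wordOf_inj dsw ds (allDs_bounds dsw hdsw).2 (allDs_bounds ds hds).2 hc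
      subst this; omega
    cases fuel with
    | zero => omega
    | succ f =>
      have hbody : loopA (f + 1) (wordOf dsw) answer (stateOf ds)
          = loopA f (wordOf dsw) (answer + 1) (stepA (stateOf ds)) := by
        simp only [loopA, if_neg hne, stepA]
        cases incFirstZero (stateOf ds) <;> rfl
      rw [hbody, hstepeq,
        ih (nextDs ds) (nextDs_mem ds hds) dsw hdsw (answer + 1) f (by omega) (by omega)]
      push_cast; ring

-- ===== VERDICT (by name: the statement is the Claim_ definition above) =====
theorem solution_spec : Claim_equal_solution := by
  intro word _hdom hpre
  obtain ⟨hlen, hall⟩ := hpre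
  have hvow : ∀ c ∈ word.toList, c ∈ (['A', 'E', 'I', 'O', 'U'] : List Char) :=
    fun c hc => of_decide_eq_true (List.all_eq_true.1 hall c hc)
  have hmemw : word.toList.map digitOf ∈ allDs := by
    refine mem_allDs _ (by simpa using hlen) ?_
    intro d hd
    obtain ⟨c, hc, rfl⟩ := List.mem_map.1 hd
    exact digitOf_mem c (hvow c hc)
  have hword : wordOf (word.toList.map digitOf) = word := by
    unfold wordOf
    rw [List.map_map]
    have hid : List.map (charOfD ∘ digitOf) word.toList = word.toList :=
      (List.map_congr_left (fun c hc => char_digit_roundtrip c (hvow c hc))).trans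
        (List.map_id word.toList)
    rw [hid]
    exact String.ofList_toList
  have hnil : ([] : List Int) ∈ allDs := by decide
  obtain ⟨_, hB, _, hnn, hub, _⟩ := P_all _ hmemw
  show solution word = solution_alt word
  rw [← hword, hB]
  have hrun := loopA_run (Bd weightsB (word.toList.map digitOf)).toNat
    [] hnil (word.toList.map digitOf) hmemw 0 3906 (by simp [Bd]; omega) (by omega)
  unfold solution
  have hstate : ([0, 0, 0, 0, 0] : List Int) = stateOf [] := by decide
  rw [hstate, hrun]
  omega
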